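-- pv_equiv track=rewrite | github.com/SoingJeang/Form160 | registerforacidburn.py | SixSupport
-- ===== SOURCE A (Python) =====
-- def SixSupport(edi, listName):
--     lenCode = len(listName)
--     ebx = 0
--     edx = 0
--     for i in range(lenCode):
--         for j in range(lenCode):
--            edx = ord(listName[i]) * ord(listName[lenCode - j - 1]) * edi
--            ebx += edx
--     return ebx
-- ===== SOURCE B (Python) =====
-- def SixSupport(edi, listName):
--     s = sum(map(ord, listName))
--     return edi * s * s
-- ===== Notes on version B (the rewrite author's own statement) =====
-- stated objective: faster
-- what changed: Replace the O(n^2) double loop over all index pairs by computing S = sum of char codes once and returning edi*S*S, using sum(i,j) ord(s[i])*ord(s[j])*edi = edi*S^2.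
import Mathlib
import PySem

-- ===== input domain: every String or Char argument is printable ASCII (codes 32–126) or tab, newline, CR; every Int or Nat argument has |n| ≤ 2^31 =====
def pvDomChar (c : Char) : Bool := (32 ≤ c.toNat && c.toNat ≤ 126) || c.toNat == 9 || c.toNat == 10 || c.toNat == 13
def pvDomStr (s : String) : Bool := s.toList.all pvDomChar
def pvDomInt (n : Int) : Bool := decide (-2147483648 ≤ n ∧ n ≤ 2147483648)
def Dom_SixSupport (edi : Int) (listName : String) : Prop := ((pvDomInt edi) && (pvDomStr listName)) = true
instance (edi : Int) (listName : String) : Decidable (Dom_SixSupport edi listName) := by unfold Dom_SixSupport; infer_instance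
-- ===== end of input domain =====

-- B replaces A's quadratic double loop by the closed form edi * S * S with S = sum of char codes (faster, asymptotic change).

-- ===== PORT A =====
-- ord(listName[i]) for an index that may (in principle) be any Int; in A all indices are in range.
def pvOrdAt (l : List Char) (i : Int) : Int := ((PySem.List.pyGetD l i ' ').toNat : Int)

def SixSupport (edi : Int) (listName : String) : Int :=
  let l := listName.toList
  let lenCode : Int := (l.length : Int)
  let st :=
    (PySem.List.pyRange 0 lenCode 1).foldl (fun (st : Int × Int) i =>
      (PySem.List.pyRange 0 lenCode 1).foldl (fun (st2 : Int × Int) j =>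
        let edx := pvOrdAt l i * pvOrdAt l (lenCode - j - 1) * edi
        (st2.1 + edx, edx)) st) ((0 : Int), (0 : Int))
  st.1

-- ===== PORT B =====
def SixSupport_alt (edi : Int) (listName : String) : Int :=
  let s := (listName.toList.map (fun c => (c.toNat : Int))).sum
  edi * s * s

-- ===== PRECONDITION & SPEC =====
def Spec_SixSupport (edi : Int) (listName : String) (out : Int) : Prop := out = SixSupport_alt edi listName
instance (edi : Int) (listName : String) (out : Int) : Decidable (Spec_SixSupport edi listName out) := by unfold Spec_SixSupport; infer_instance

-- ===== CLAIM (what is proved, stated in full; the proofs are below) =====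
def Claim_equal_SixSupport : Prop := ∀ (edi : Int) (listName : String), Dom_SixSupport edi listName → Spec_SixSupport edi listName (SixSupport edi listName)

-- ===== LEMMAS AND PROOFS =====

-- The first component of a fold whose step adds f i to the first component.
theorem pv_fold_fst (step : Int × Int → Int → Int × Int) (f : Int → Int)
    (h : ∀ st i, (step st i).1 = st.1 + f i) :
    ∀ (L : List Int) (st : Int × Int), (L.foldl step st).1 = st.1 + (L.map f).sum := by
  intro L
  induction L with
  | nil => intro st; simp
  | cons x xs ih =>
    intro st
    simp only [List.foldl_cons, List.map_cons, List.sum_cons]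
    rw [ih, h]
    ring

theorem pv_ordAt_range (l : List Char) :
    ((PySem.List.pyRange 0 (l.length : Int) 1).map (fun i => pvOrdAt l i)).sum
      = (l.map (fun c => (c.toNat : Int))).sum := by
  congr 1
  rw [PySem.List.pyRange_one]
  apply List.ext_getElem
  · simp
  · intro n h1 h2
    simp only [List.getElem_map, List.getElem_range]
    have hn : n < l.length := by simpa using h2
    rw [pvOrdAt, PySem.List.pyGetD_eq_getElem]
    · simp
    · omega
    · simp; omega

theorem pv_ordAt_range_rev (l : List Char) :
    ((PySem.List.pyRange 0 (l.length : Int) 1).map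
      (fun j => pvOrdAt l ((l.length : Int) - j - 1))).sum
      = (l.map (fun c => (c.toNat : Int))).sum := by
  have hrev : ((PySem.List.pyRange 0 (l.length : Int) 1).map
      (fun j => pvOrdAt l ((l.length : Int) - j - 1))) = (l.reverse.map (fun c => (c.toNat : Int))) := by
    rw [PySem.List.pyRange_one]
    apply List.ext_getElem
    · simp
    · intro n h1 h2
      simp only [List.getElem_map, List.getElem_range, List.getElem_reverse]
      have hn : n < l.length := by simpa using h2
      have he : ((l.length : Int) - (0 + (n : Int)) - 1) = ((l.length - 1 - n : Nat) : Int) := by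
        omega
      rw [he, pvOrdAt, PySem.List.pyGetD_eq_getElem]
      · simp
      · omega
      · simp; omega
  rw [hrev, List.map_reverse, List.sum_reverse]

theorem SixSupport_eq (edi : Int) (listName : String) :
    SixSupport edi listName = SixSupport_alt edi listName := by
  unfold SixSupport SixSupport_alt
  set l := listName.toList with hl
  set S := (l.map (fun c => (c.toNat : Int))).sum with hS
  simp only []
  rw [pv_fold_fst _ (fun i => pvOrdAt l i * S * edi)]
  · have : ((PySem.List.pyRange 0 ((l.length : Int)) 1).map (fun i => pvOrdAt l i * S * edi)).sum
        = ((PySem.List.pyRange 0 ((l.length : Int)) 1).map (fun i => pvOrdAt l i)).sum * (S * edi) := by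
      simp only [show (fun i => pvOrdAt l i * S * edi) = (fun i => pvOrdAt l i * (S * edi)) from
        funext (fun i => by ring)]
      exact List.sum_map_mul_right _ _ _
    rw [this, pv_ordAt_range]
    ring
  · intro st i
    rw [pv_fold_fst _ (fun j => pvOrdAt l i * pvOrdAt l ((l.length : Int) - j - 1) * edi)
      (fun st j => rfl)]
    have : ((PySem.List.pyRange 0 ((l.length : Int)) 1).map
        (fun j => pvOrdAt l i * pvOrdAt l ((l.length : Int) - j - 1) * edi)).sum
        = pvOrdAt l i * (((PySem.List.pyRange 0 ((l.length : Int)) 1).map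
            (fun j => pvOrdAt l ((l.length : Int) - j - 1))).sum * edi) := by
      rw [← List.sum_map_mul_right, ← List.sum_map_mul_left]
      exact congrArg List.sum (List.map_congr_left (fun j _ => by ring))
    rw [this, pv_ordAt_range_rev]
    ring

-- ===== VERDICT (by name: the statement is the Claim_ definition above) =====
theorem SixSupport_spec : Claim_equal_SixSupport := by
  intro edi listName _
  exact SixSupport_eq edi listName
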